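-- pv_equiv track=rewrite | github.com/lvanroy/Analysis-of-Focal-Methods-using-Intermediary-LLVM | llvmAnalyser/types.py | get_array_type
-- ===== SOURCE A (Python) =====
-- def check_for_function_type(specified_type, tokens):
--     if (len(tokens) == 0 or "(" not in tokens[0]) and specified_type.count("(") == specified_type.count(")"):
--         return specified_type, tokens
--
--     if tokens[0].split("(")[0] not in {"", "*"} and tokens[0].count("(") != 0:
--         return specified_type, tokens
--
--     open_counter = specified_type.count("(") - specified_type.count(")")
--     while True:
--         open_counter += tokens[0].count("(")
--         open_counter -= tokens[0].count(")")
--         specified_type += " {}".format(tokens[0])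
--         tokens.pop(0)
--         if open_counter == 0:
--             return specified_type, tokens
--
-- def check_for_pointer_type(specified_type, tokens):
--     if len(tokens) == 0:
--         return specified_type, tokens
--     if "*" not in tokens[0] or ("(" in tokens[0] and tokens[0].count("(") != tokens[0].count(")")):
--         return check_for_function_type(specified_type, tokens)
--
--     temp_tokens = tokens[0].split("*")
--     if temp_tokens[1] != "":
--         tokens[0] = temp_tokens[1]
--     else:
--         tokens.pop(0)
--
--     specified_type += " {}*".format(temp_tokens[0])
--     return check_for_function_type(specified_type, tokens)
--
-- def get_array_type(tokens):
--     if "[" not in tokens[0]: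
--         return None
--
--     specified_type = tokens[0]
--     tokens.pop(0)
--     open_counter = 1
--     while True:
--         open_counter += tokens[0].count("[")
--         open_counter -= tokens[0].count("]")
--         specified_type += " {}".format(tokens[0])
--         tokens.pop(0)
--         if open_counter == 0:
--             return check_for_pointer_type(specified_type, tokens)
-- ===== SOURCE B (Python) =====
-- def get_array_type(tokens):
--     # Flattened single-pass re-implementation: index scans + slices + " ".join
--     # instead of three mutually recursive helpers that pop tokens and grow the
--     # string one piece at a time.  Does NOT mutate `tokens`; return value only.
--     if "[" not in tokens[0]:
--         return None
--     # phase 1: consume the array part, balancing '['/']'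
--     oc, i = 1, 1
--     while oc != 0:
--         oc += tokens[i].count("[") - tokens[i].count("]")
--         i += 1
--     spec = " ".join(tokens[:i])
--     rest = tokens[i:]
--     if not rest:
--         return spec, rest
--     # phase 2: optional pointer
--     head = rest[0]
--     if "*" in head and not ("(" in head and head.count("(") != head.count(")")):
--         parts = head.split("*")
--         spec += " " + parts[0] + "*"
--         rest = ([parts[1]] if parts[1] else []) + rest[1:]
--     # phase 3: optional function type, balancing '('/')'
--     if (not rest or "(" not in rest[0]) and spec.count("(") == spec.count(")"):
--         return spec, rest
--     if rest[0].split("(")[0] not in ("", "*") and rest[0].count("(") != 0: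
--         return spec, rest
--     oc = spec.count("(") - spec.count(")")
--     j = 0
--     while True:
--         oc += rest[j].count("(") - rest[j].count(")")
--         j += 1
--         if oc == 0:
--             return spec + " " + " ".join(rest[:j]), rest[j:]
-- ===== Notes on version B (the rewrite author's own statement) =====
-- stated objective: simpler
-- what changed: Replaces the three mutually recursive, token-popping helpers and per-token string concatenation with one flat three-phase function that locates each phase boundary by an index scan over balances and builds the result with slices and a single join, without mutating the input list.
import Mathlib
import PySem

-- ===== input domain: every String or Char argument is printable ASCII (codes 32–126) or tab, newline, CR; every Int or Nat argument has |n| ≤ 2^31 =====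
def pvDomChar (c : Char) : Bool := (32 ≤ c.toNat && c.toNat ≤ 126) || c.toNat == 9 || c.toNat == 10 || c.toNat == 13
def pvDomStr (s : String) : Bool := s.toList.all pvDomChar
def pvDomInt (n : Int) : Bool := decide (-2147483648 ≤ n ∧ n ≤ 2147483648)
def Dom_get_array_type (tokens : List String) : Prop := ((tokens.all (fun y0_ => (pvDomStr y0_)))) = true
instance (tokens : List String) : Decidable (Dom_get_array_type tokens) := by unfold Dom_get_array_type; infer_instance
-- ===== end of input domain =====

-- B re-implements A's three mutually recursive, token-popping helpers as one flat
-- three-phase function (index scans + slices + a single join); equivalence is about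
-- the RETURN value only — Python A pops from `tokens` in place, B does not mutate it.

-- balance of one token, shared by both ports ('[' minus ']', '(' minus ')')
def pvBrk (t : String) : Int := (PySem.Str.count t "[" : Int) - (PySem.Str.count t "]" : Int)
def pvPar (t : String) : Int := (PySem.Str.count t "(" : Int) - (PySem.Str.count t ")" : Int)

-- ===== PORT A =====
-- the `while True` loop of check_for_function_type (raise → none)
def pvAFunLoop (oc : Int) (st : String) : List String → Option (String × List String)
  | [] => none
  | t :: ts =>
    let oc' := oc + pvPar t
    let st' := st ++ " " ++ t
    if oc' = 0 then some (st', ts) else pvAFunLoop oc' st' ts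

def check_for_function_type (st : String) (toks : List String) : Option (String × List String) :=
  if ((match toks with | [] => true | t :: _ => !PySem.Str.isIn "(" t)
       && (PySem.Str.count st "(" == PySem.Str.count st ")")) = true then
    some (st, toks)
  else
    match toks with
    | [] => none     -- tokens[0] : IndexError
    | t :: _ =>
      if ¬(((PySem.Str.split? t "(").getD []).headD "" ∈ ["", "*"]) ∧ PySem.Str.count t "(" ≠ 0 then
        some (st, toks)
      else
        pvAFunLoop ((PySem.Str.count st "(" : Int) - (PySem.Str.count st ")" : Int)) st toks

def check_for_pointer_type (st : String) (toks : List String) : Option (String × List String) :=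
  match toks with
  | [] => some (st, toks)
  | t :: ts =>
    if ((!PySem.Str.isIn "*" t) || (PySem.Str.isIn "(" t && (PySem.Str.count t "(" != PySem.Str.count t ")"))) = true then
      check_for_function_type st (t :: ts)
    else
      let parts := (PySem.Str.split? t "*").getD []
      let toks' := if parts.getD 1 "" ≠ "" then parts.getD 1 "" :: ts else ts
      check_for_function_type (st ++ " " ++ parts.headD "" ++ "*") toks'

-- the `while True` loop of get_array_type
def pvAArrLoop (oc : Int) (st : String) : List String → Option (String × List String)
  | [] => none
  | t :: ts =>
    let oc' := oc + pvBrk t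
    let st' := st ++ " " ++ t
    if oc' = 0 then check_for_pointer_type st' ts else pvAArrLoop oc' st' ts

def get_array_type : List String → Option (String × List String)
  | [] => none     -- tokens[0] : IndexError
  | t0 :: rest => if (!PySem.Str.isIn "[" t0) = true then none else pvAArrLoop 1 t0 rest

-- ===== PORT B =====
-- B's index-advancing `while` loops: how many tokens get consumed until the
-- running balance first hits 0 (none = the loop runs off the end, IndexError)
def pvBScan (c : String → Int) : Int → List String → Option Nat
  | _, [] => none
  | oc, t :: ts =>
    let oc' := oc + c t
    if oc' = 0 then some 1 else (pvBScan c oc' ts).map (· + 1)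

def get_array_type_alt (tokens : List String) : Option (String × List String) :=
  match tokens with
  | [] => none
  | t0 :: rest =>
    if (!PySem.Str.isIn "[" t0) = true then none else
    match pvBScan pvBrk 1 rest with
    | none => none
    | some n =>
      let spec := PySem.Str.join " " (tokens.take (n + 1))
      let rest1 := tokens.drop (n + 1)
      if rest1.isEmpty then some (spec, rest1) else
      let h := rest1.headD ""
      let pr :=
        if (PySem.Str.isIn "*" h && !(PySem.Str.isIn "(" h && (PySem.Str.count h "(" != PySem.Str.count h ")"))) = true then
          let parts := (PySem.Str.split? h "*").getD []
          (spec ++ " " ++ parts.headD "" ++ "*",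
           (if parts.getD 1 "" ≠ "" then [parts.getD 1 ""] else []) ++ rest1.tail)
        else (spec, rest1)
      if ((pr.2.isEmpty || !PySem.Str.isIn "(" (pr.2.headD "")) && (PySem.Str.count pr.1 "(" == PySem.Str.count pr.1 ")")) = true then
        some pr
      else
        match pr.2 with
        | [] => none     -- tokens[0].split : IndexError
        | h2 :: _ =>
          if ¬(((PySem.Str.split? h2 "(").getD []).headD "" ∈ ["", "*"]) ∧ PySem.Str.count h2 "(" ≠ 0 then
            some pr
          else
            match pvBScan pvPar ((PySem.Str.count pr.1 "(" : Int) - (PySem.Str.count pr.1 ")" : Int)) pr.2 with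
            | none => none
            | some m => some (pr.1 ++ " " ++ PySem.Str.join " " (pr.2.take m), pr.2.drop m)

-- ===== PRECONDITION & SPEC =====
-- Pre_ = exactly the inputs on which Python A returns (A raises IndexError on an empty
-- token list and whenever a balancing loop exhausts the tokens); stated via per-token
-- bracket/paren balances only.
def pvPreB (tokens : List String) : Bool :=
  match tokens with
  | [] => false
  | t0 :: rest =>
    if (!PySem.Str.isIn "[" t0) = true then true else
    -- least i with the running '['/']' balance of tokens[1..i+1] cancelling the opening 1
    match (List.range rest.length).find? (fun i => 1 + ((rest.take (i + 1)).map pvBrk).sum == 0) with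
    | none => false
    | some i =>
      let n := i + 1
      let p := pvPar t0 + ((rest.take n).map pvPar).sum
      match rest.drop n with
      | [] => true
      | h :: tl =>
        let pr :=
          if (PySem.Str.isIn "*" h && !(PySem.Str.isIn "(" h && (PySem.Str.count h "(" != PySem.Str.count h ")"))) = true then
            let parts := (PySem.Str.split? h "*").getD []
            (p + pvPar (parts.headD ""),
             (if parts.getD 1 "" ≠ "" then [parts.getD 1 ""] else []) ++ tl)
          else (p, h :: tl)
        if ((pr.2.isEmpty || !PySem.Str.isIn "(" (pr.2.headD "")) && (pr.1 == 0)) = true then true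
        else
          match pr.2 with
          | [] => false
          | h2 :: _ =>
            if ¬(((PySem.Str.split? h2 "(").getD []).headD "" ∈ ["", "*"]) ∧ PySem.Str.count h2 "(" ≠ 0 then true
            else
              -- some prefix of the remaining tokens closes the '(' balance pr.1
              (List.range pr.2.length).any (fun j => pr.1 + ((pr.2.take (j + 1)).map pvPar).sum == 0)

def Pre_get_array_type (tokens : List String) : Prop := pvPreB tokens = true
instance (tokens : List String) : Decidable (Pre_get_array_type tokens) := by unfold Pre_get_array_type; infer_instance

def pvWitness_get_array_type : List String := ["[4", "x", "i32]"]

def Spec_get_array_type (tokens : List String) (out : Option (String × List String)) : Prop := out = get_array_type_alt tokens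
instance (tokens : List String) (out : Option (String × List String)) : Decidable (Spec_get_array_type tokens out) := by unfold Spec_get_array_type; infer_instance

-- ===== CLAIM (what is proved, stated in full; the proofs are below) =====
def Claim_equal_get_array_type : Prop := ∀ (tokens : List String), Dom_get_array_type tokens → Pre_get_array_type tokens → Spec_get_array_type tokens (get_array_type tokens)

-- ===== LEMMAS AND PROOFS =====
-- A's string accumulator: one `specified_type += " {}".format(t)` step per token
def pvAppSp (st : String) (l : List String) : String := l.foldl (fun a t => a ++ " " ++ t) st

theorem pvAppSp_pull (l : List String) (a b : String) : pvAppSp (a ++ b) l = a ++ pvAppSp b l := by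
  induction l generalizing b with
  | nil => rfl
  | cons t ts ih =>
    show pvAppSp (a ++ b ++ " " ++ t) ts = a ++ pvAppSp (b ++ " " ++ t) ts
    rw [show a ++ b ++ " " ++ t = a ++ (b ++ " " ++ t) by simp only [String.append_assoc]]
    exact ih (b ++ " " ++ t)

theorem pvJoin_eq_appSp (l : List String) (t0 : String) :
    PySem.Str.join " " (t0 :: l) = pvAppSp t0 l := by
  induction l generalizing t0 with
  | nil =>
    apply String.toList_inj.mp
    simp [PySem.Str.toList_join, PySem.Chars.join_singleton, pvAppSp]
  | cons t1 ts ih =>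
    have h : PySem.Str.join " " (t0 :: t1 :: ts) = t0 ++ " " ++ PySem.Str.join " " (t1 :: ts) := by
      apply String.toList_inj.mp
      simp [PySem.Str.toList_join, PySem.Chars.join_cons_cons]
    rw [h, ih]
    show (t0 ++ " ") ++ pvAppSp t1 ts = pvAppSp t0 (t1 :: ts)
    rw [← pvAppSp_pull ts (t0 ++ " ") t1]
    rfl

theorem pvAppSp_eq_join (l : List String) (st : String) (h : l ≠ []) :
    pvAppSp st l = st ++ " " ++ PySem.Str.join " " l := by
  match l with
  | t :: ts =>
    rw [pvJoin_eq_appSp, ← pvAppSp_pull ts (st ++ " ") t]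
    rfl

theorem pvBScan_pos (c : String → Int) (oc : Int) (ts : List String) (m : Nat)
    (h : pvBScan c oc ts = some m) : m ≠ 0 := by
  match ts with
  | [] => simp [pvBScan] at h
  | t :: ts' =>
    simp only [pvBScan] at h
    split at h
    · simp only [Option.some.injEq] at h
      omega
    · cases h' : pvBScan c (oc + c t) ts' with
      | none => rw [h'] at h; simp at h
      | some k => rw [h'] at h; simp at h; omega

theorem pvAFunLoop_eq (ts : List String) (oc : Int) (st : String) :
    pvAFunLoop oc st ts = match pvBScan pvPar oc ts with
      | none => none
      | some m => some (pvAppSp st (ts.take m), ts.drop m) := by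
  induction ts generalizing oc st with
  | nil => rfl
  | cons t ts' ih =>
    simp only [pvAFunLoop, pvBScan]
    by_cases h : oc + pvPar t = 0
    · simp [h, pvAppSp]
    · simp only [h, if_false]
      rw [ih]
      cases h' : pvBScan pvPar (oc + pvPar t) ts' <;> simp [pvAppSp]

theorem pvAArrLoop_eq (ts : List String) (oc : Int) (st : String) :
    pvAArrLoop oc st ts = match pvBScan pvBrk oc ts with
      | none => none
      | some n => check_for_pointer_type (pvAppSp st (ts.take n)) (ts.drop n) := by
  induction ts generalizing oc st with
  | nil => rfl
  | cons t ts' ih =>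
    simp only [pvAArrLoop, pvBScan]
    by_cases h : oc + pvBrk t = 0
    · simp [h, pvAppSp]
    · simp only [h, if_false]
      rw [ih]
      cases h' : pvBScan pvBrk (oc + pvBrk t) ts' <;> simp [pvAppSp]

-- B's phase 3 (function type), factored out of get_array_type_alt for the proof
def pvPh3 (st : String) (rem : List String) : Option (String × List String) :=
  if ((rem.isEmpty || !PySem.Str.isIn "(" (rem.headD "")) && (PySem.Str.count st "(" == PySem.Str.count st ")")) = true then
    some (st, rem)
  else
    match rem with
    | [] => none
    | h2 :: _ =>
      if ¬(((PySem.Str.split? h2 "(").getD []).headD "" ∈ ["", "*"]) ∧ PySem.Str.count h2 "(" ≠ 0 then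
        some (st, rem)
      else
        match pvBScan pvPar ((PySem.Str.count st "(" : Int) - (PySem.Str.count st ")" : Int)) rem with
        | none => none
        | some m => some (st ++ " " ++ PySem.Str.join " " (rem.take m), rem.drop m)

-- B's phases 2+3, factored out of get_array_type_alt for the proof
def pvPh23 (st : String) (rem : List String) : Option (String × List String) :=
  if rem.isEmpty then some (st, rem) else
  let h := rem.headD ""
  let pr :=
    if (PySem.Str.isIn "*" h && !(PySem.Str.isIn "(" h && (PySem.Str.count h "(" != PySem.Str.count h ")"))) = true then
      let parts := (PySem.Str.split? h "*").getD []
      (st ++ " " ++ parts.headD "" ++ "*",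
       (if parts.getD 1 "" ≠ "" then [parts.getD 1 ""] else []) ++ rem.tail)
    else (st, rem)
  pvPh3 pr.1 pr.2

theorem check_for_function_type_eq (st : String) (toks : List String) :
    check_for_function_type st toks = pvPh3 st toks := by
  match toks with
  | [] => rfl
  | h2 :: tl =>
    show (if ((!PySem.Str.isIn "(" h2) && (PySem.Str.count st "(" == PySem.Str.count st ")")) = true
           then some (st, h2 :: tl)
           else if ¬(((PySem.Str.split? h2 "(").getD []).headD "" ∈ ["", "*"]) ∧ PySem.Str.count h2 "(" ≠ 0
             then some (st, h2 :: tl)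
             else pvAFunLoop ((PySem.Str.count st "(" : Int) - (PySem.Str.count st ")" : Int)) st (h2 :: tl))
        = (if ((!PySem.Str.isIn "(" h2) && (PySem.Str.count st "(" == PySem.Str.count st ")")) = true
           then some (st, h2 :: tl)
           else if ¬(((PySem.Str.split? h2 "(").getD []).headD "" ∈ ["", "*"]) ∧ PySem.Str.count h2 "(" ≠ 0
             then some (st, h2 :: tl)
             else match pvBScan pvPar ((PySem.Str.count st "(" : Int) - (PySem.Str.count st ")" : Int)) (h2 :: tl) with
               | none => none
               | some m => some (st ++ " " ++ PySem.Str.join " " (List.take m (h2 :: tl)), List.drop m (h2 :: tl)))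
    by_cases hg1 : ((!PySem.Str.isIn "(" h2) && (PySem.Str.count st "(" == PySem.Str.count st ")")) = true
    · rw [if_pos hg1, if_pos hg1]
    · rw [if_neg hg1, if_neg hg1]
      by_cases hg2 : ¬(((PySem.Str.split? h2 "(").getD []).headD "" ∈ ["", "*"]) ∧ PySem.Str.count h2 "(" ≠ 0
      · rw [if_pos hg2, if_pos hg2]
      · rw [if_neg hg2, if_neg hg2, pvAFunLoop_eq]
        cases h' : pvBScan pvPar ((PySem.Str.count st "(" : Int) - (PySem.Str.count st ")" : Int)) (h2 :: tl) with
        | none => rfl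
        | some m =>
          have hm := pvBScan_pos _ _ _ _ h'
          have hne : List.take m (h2 :: tl) ≠ [] := by
            cases m with
            | zero => omega
            | succ k => simp
          show some (pvAppSp st (List.take m (h2 :: tl)), List.drop m (h2 :: tl))
             = some (st ++ " " ++ PySem.Str.join " " (List.take m (h2 :: tl)), List.drop m (h2 :: tl))
          rw [pvAppSp_eq_join _ _ hne]

theorem pv_bnot_or (a b : Bool) : (!a || b) = !(a && !b) := by cases a <;> cases b <;> rfl

theorem check_for_pointer_type_eq (st : String) (rem : List String) :
    check_for_pointer_type st rem = pvPh23 st rem := by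
  match rem with
  | [] => rfl
  | h :: tl =>
    show (if ((!PySem.Str.isIn "*" h) || (PySem.Str.isIn "(" h && (PySem.Str.count h "(" != PySem.Str.count h ")"))) = true
           then check_for_function_type st (h :: tl)
           else check_for_function_type (st ++ " " ++ ((PySem.Str.split? h "*").getD []).headD "" ++ "*")
                  (if ((PySem.Str.split? h "*").getD []).getD 1 "" ≠ "" then ((PySem.Str.split? h "*").getD []).getD 1 "" :: tl else tl))
        = pvPh3 (if (PySem.Str.isIn "*" h && !(PySem.Str.isIn "(" h && (PySem.Str.count h "(" != PySem.Str.count h ")"))) = true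
                  then (st ++ " " ++ ((PySem.Str.split? h "*").getD []).headD "" ++ "*",
                        (if ((PySem.Str.split? h "*").getD []).getD 1 "" ≠ "" then [((PySem.Str.split? h "*").getD []).getD 1 ""] else []) ++ tl)
                  else (st, h :: tl)).1
                (if (PySem.Str.isIn "*" h && !(PySem.Str.isIn "(" h && (PySem.Str.count h "(" != PySem.Str.count h ")"))) = true
                  then (st ++ " " ++ ((PySem.Str.split? h "*").getD []).headD "" ++ "*",
                        (if ((PySem.Str.split? h "*").getD []).getD 1 "" ≠ "" then [((PySem.Str.split? h "*").getD []).getD 1 ""] else []) ++ tl)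
                  else (st, h :: tl)).2
    rw [pv_bnot_or]
    cases hc : (PySem.Str.isIn "*" h && !(PySem.Str.isIn "(" h && (PySem.Str.count h "(" != PySem.Str.count h ")")))
    · rw [if_pos (show (!false) = true from rfl), if_neg (show ¬(false = true) by simp)]
      exact check_for_function_type_eq st (h :: tl)
    · rw [if_neg (show ¬((!true) = true) by simp), if_pos rfl, check_for_function_type_eq]
      by_cases hp : ((PySem.Str.split? h "*").getD []).getD 1 "" ≠ ""
      · rw [if_pos hp, if_pos hp]; rfl
      · rw [if_neg hp, if_neg hp]; rfl

theorem get_array_type_eq (tokens : List String) :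
    get_array_type tokens = get_array_type_alt tokens := by
  match tokens with
  | [] => rfl
  | t0 :: rest =>
    show (if (!PySem.Str.isIn "[" t0) = true then none else pvAArrLoop 1 t0 rest)
       = (if (!PySem.Str.isIn "[" t0) = true then none
          else match pvBScan pvBrk 1 rest with
            | none => none
            | some n => pvPh23 (PySem.Str.join " " (t0 :: List.take n rest)) (List.drop n rest))
    by_cases hb : (!PySem.Str.isIn "[" t0) = true
    · rw [if_pos hb, if_pos hb]
    · rw [if_neg hb, if_neg hb, pvAArrLoop_eq]
      cases h' : pvBScan pvBrk 1 rest with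
      | none => rfl
      | some n =>
        show check_for_pointer_type (pvAppSp t0 (List.take n rest)) (List.drop n rest)
           = pvPh23 (PySem.Str.join " " (t0 :: List.take n rest)) (List.drop n rest)
        rw [pvJoin_eq_appSp]
        exact check_for_pointer_type_eq _ _

-- ===== VERDICT (by name: the statement is the Claim_ definition above) =====
theorem get_array_type_spec : Claim_equal_get_array_type := by
  intro tokens _ _
  unfold Spec_get_array_type
  exact get_array_type_eq tokens
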